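-- pv_equiv track=rewrite | github.com/DaveMatNat/Algorithms-notes-and-implementation | hw1/Q7.py | split_candy
-- ===== SOURCE A (Python) =====
-- def split_candy(children: int, candies: list) -> list:
--     res = [0] * children
--     visual = [[] for _ in range(children)]
--
--     candies.sort()
--
--     for i in range(children):
--         popped = candies.pop()
--         res[i] += popped
--         visual[i].append(popped)
--
--     while candies:
--         min_idx = -1
--         min_candies = min(res)
--         for c in range(len(res)):
--             if res[c] == min_candies:
--                 min_idx = c
--                 break
--         popped = candies.pop()
--         res[min_idx] += popped
--         visual[min_idx].append(popped)
--     return [i[::-1] for i in visual] # res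
-- ===== SOURCE B (Python) =====
-- import bisect
--
-- def split_candy(children: int, candies: list) -> list:
--     # Greedy: hand out candies in decreasing order; each goes to the child with the
--     # smallest total so far (lowest index on ties).  Instead of rescanning the totals
--     # each step, keep a pool of (total, child) pairs sorted lexicographically: its
--     # head is always the minimum-total child (lowest index on ties).
--     desc = sorted(candies)[::-1]
--     visual = []
--     pool = []
--     for i in range(children):
--         visual.append([desc[i]])
--         bisect.insort(pool, (desc[i], i))
--     for c in desc[children:]:
--         total, idx = pool.pop(0)
--         visual[idx].append(c)
--         bisect.insort(pool, (total + c, idx))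
--     return [v[::-1] for v in visual]
-- ===== Notes on version B (the rewrite author's own statement) =====
-- stated objective: faster
-- what changed: A rescans the whole totals list every step (min + linear first-index search); B keeps a sorted pool of (total, child) pairs and takes its head and re-inserts with bisect.insort, removing the per-step interpreted scan (B also does not mutate the caller's list, while A sorts and empties it).
import Mathlib
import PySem

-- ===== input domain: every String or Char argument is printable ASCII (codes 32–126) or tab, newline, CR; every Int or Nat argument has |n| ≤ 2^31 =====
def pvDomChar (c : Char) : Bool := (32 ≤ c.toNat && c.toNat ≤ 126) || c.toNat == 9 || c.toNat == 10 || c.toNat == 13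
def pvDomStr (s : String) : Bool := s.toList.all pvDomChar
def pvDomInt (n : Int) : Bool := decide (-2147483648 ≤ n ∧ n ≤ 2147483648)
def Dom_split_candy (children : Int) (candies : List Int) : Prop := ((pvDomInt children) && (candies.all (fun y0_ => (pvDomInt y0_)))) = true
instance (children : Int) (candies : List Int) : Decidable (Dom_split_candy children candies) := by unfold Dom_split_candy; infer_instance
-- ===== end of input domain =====

-- B replaces A's per-step rescan of the totals by a lexicographically sorted pool of
-- (total, child) pairs maintained with insertion (bisect.insort); equivalence is about
-- the RETURN value only: A sorts and empties the caller's candies list, B does not mutate it.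

-- ===== PORT A =====

-- shared construct: Python's  xs[::-1]  (both sources use it in the final comprehension)
def pyRev {α : Type} (xs : List α) : List α := (PySem.List.slice? xs none none (-1)).getD xs

-- A's inner scan:  min_idx = -1; for c in range(len(res)):  if res[c] == m: min_idx = c; break
def splitA_scan (l : List Int) (m : Int) (c : Int) : Int :=
  match l with
  | [] => -1
  | x :: t => if x = m then c else splitA_scan t m (c + 1)

-- body of A's first loop:  popped = candies.pop(); res[i] += popped; visual[i].append(popped)
-- (pop on an empty list raises IndexError: excluded by Pre_, the state is then left unchanged;
-- pyGetD/pySetD are the total forms of res[i]/res[i]=… — Pre_ keeps i in range)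
def splitA_step1 (st : List Int × List Int × List (List Int)) (i : Int) :
    List Int × List Int × List (List Int) :=
  match PySem.List.pop? st.1 with
  | none => st
  | some (p, cs') =>
      (cs', PySem.List.pySetD st.2.1 i (PySem.List.pyGetD st.2.1 i 0 + p),
       PySem.List.pySetD st.2.2 i (PySem.List.pyGetD st.2.2 i [] ++ [p]))

-- A's  while candies:  loop (min(res) on an empty res raises ValueError: excluded by Pre_)
def splitA_loop2 (cs : List Int) (res : List Int) (vis : List (List Int)) :
    List Int × List (List Int) :=
  if cs = [] then (res, vis)
  else
    match PySem.List.min? res (fun x => x) with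
    | none => (res, vis)
    | some m =>
      let idx := splitA_scan res m 0
      match hp : PySem.List.pop? cs with
      | none => (res, vis)
      | some (p, cs') =>
          splitA_loop2 cs'
            (PySem.List.pySetD res idx (PySem.List.pyGetD res idx 0 + p))
            (PySem.List.pySetD vis idx (PySem.List.pyGetD vis idx [] ++ [p]))
termination_by cs.length
decreasing_by
  have h := PySem.List.length_of_pop?_eq_some _ hp
  simp at h; omega

def split_candy (children : Int) (candies : List Int) : List (List Int) :=
  -- res = [0] * children  (Python's list repetition is empty for children ≤ 0, as is toNat)
  let res := List.replicate children.toNat (0 : Int)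
  -- visual = [[] for _ in range(children)]
  let visual := (PySem.List.pyRange 0 children 1).map (fun _ => ([] : List Int))
  -- candies.sort()
  let cs := PySem.List.sorted candies (fun x => x)
  -- for i in range(children): …
  let st := (PySem.List.pyRange 0 children 1).foldl splitA_step1 (cs, res, visual)
  -- while candies: …
  let rv := splitA_loop2 st.1 st.2.1 st.2.2
  -- return [i[::-1] for i in visual]
  rv.2.map (fun v => pyRev v)

-- ===== PORT B =====

-- Python compares tuples lexicographically; Lean's `<` on pairs is pointwise, so the
-- order bisect.insort uses on (total, child) pairs is spelled out.
def pairLt (a b : Int × Int) : Bool := decide (a.1 < b.1 ∨ (a.1 = b.1 ∧ a.2 < b.2))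

-- body of B's first loop: visual.append([desc[i]]); bisect.insort(pool, (desc[i], i))
-- (desc[i] out of range raises IndexError: excluded by Pre_; insort = insert keeping the
-- list sorted, after equal elements — PySem.List.insertBy with the strict order pairLt)
def splitB_init (desc : List Int) (st : List (List Int) × List (Int × Int)) (i : Int) :
    List (List Int) × List (Int × Int) :=
  (st.1 ++ [[PySem.List.pyGetD desc i 0]],
   PySem.List.insertBy pairLt (PySem.List.pyGetD desc i 0, i) st.2)

-- body of B's second loop: total, idx = pool.pop(0); visual[idx].append(c); insort(pool, …)
-- (pool.pop(0) on an empty pool raises IndexError: excluded by Pre_, state left unchanged)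
def splitB_step (st : List (List Int) × List (Int × Int)) (c : Int) :
    List (List Int) × List (Int × Int) :=
  match PySem.List.pop? st.2 0 with
  | none => st
  | some ((total, idx), rest) =>
      (PySem.List.pySetD st.1 idx (PySem.List.pyGetD st.1 idx [] ++ [c]),
       PySem.List.insertBy pairLt (total + c, idx) rest)

def split_candy_alt (children : Int) (candies : List Int) : List (List Int) :=
  -- desc = sorted(candies)[::-1]
  let desc := pyRev (PySem.List.sorted candies (fun x => x))
  -- for i in range(children): …
  let st0 := (PySem.List.pyRange 0 children 1).foldl (splitB_init desc) ([], [])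
  -- for c in desc[children:]: …
  let st := (PySem.List.slice desc (some children) none).foldl splitB_step st0
  -- return [v[::-1] for v in visual]
  st.1.map (fun v => pyRev v)

-- ===== PRECONDITION & SPEC =====

-- Pre_ excludes exactly the inputs where A raises: candies.pop() on an exhausted list
-- (fewer candies than children) raises IndexError, and min(res) with res == [] (children ≤ 0
-- but candies left to hand out) raises ValueError.
def Pre_split_candy (children : Int) (candies : List Int) : Prop :=
  children ≤ (candies.length : Int) ∧ (children ≤ 0 → candies = [])
instance (children : Int) (candies : List Int) : Decidable (Pre_split_candy children candies) := by
  unfold Pre_split_candy; infer_instance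

def pvWitness_split_candy : Int × List Int := (2, [3, 1, 2])

def Spec_split_candy (children : Int) (candies : List Int) (out : List (List Int)) : Prop :=
  out = split_candy_alt children candies
instance (children : Int) (candies : List Int) (out : List (List Int)) :
    Decidable (Spec_split_candy children candies out) := by unfold Spec_split_candy; infer_instance

-- ===== CLAIM (what is proved, stated in full; the proofs are below) =====
def Claim_equal_split_candy : Prop := ∀ (children : Int) (candies : List Int), Dom_split_candy children candies → Pre_split_candy children candies → Spec_split_candy children candies (split_candy children candies)

-- ===== LEMMAS AND PROOFS =====

theorem pyRev_eq_reverse {α : Type} (xs : List α) : pyRev xs = xs.reverse := by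
  simp [pyRev, PySem.List.slice?_none_none_neg_one]

theorem insertBy_nil {α : Type} (b : α → α → Bool) (x : α) :
    PySem.List.insertBy b x [] = [x] := rfl

theorem insertBy_cons {α : Type} (b : α → α → Bool) (x y : α) (ys : List α) :
    PySem.List.insertBy b x (y :: ys) =
      if b x y then x :: y :: ys else y :: PySem.List.insertBy b x ys := rfl

theorem perm_insertBy {α : Type} (b : α → α → Bool) (x : α) :
    ∀ ys : List α, (PySem.List.insertBy b x ys).Perm (x :: ys)
  | [] => by simp [insertBy_nil]
  | y :: ys => by
      rw [insertBy_cons]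
      split_ifs
      · exact List.Perm.refl _
      · exact ((perm_insertBy b x ys).cons y).trans (List.Perm.swap x y ys)

theorem pairLt_trans {a b c : Int × Int} (h1 : pairLt a b = true) (h2 : pairLt b c = true) :
    pairLt a c = true := by
  simp only [pairLt, decide_eq_true_eq] at h1 h2 ⊢; omega

theorem pairLt_total {a b : Int × Int} (h : a.2 ≠ b.2) :
    pairLt a b = true ∨ pairLt b a = true := by
  simp only [pairLt, decide_eq_true_eq]; omega

theorem pairwise_insertBy (x : Int × Int) :
    ∀ ys : List (Int × Int), ys.Pairwise (fun a b => pairLt a b = true) →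
      (∀ y ∈ ys, y.2 ≠ x.2) →
      (PySem.List.insertBy pairLt x ys).Pairwise (fun a b => pairLt a b = true)
  | [], _, _ => by simp [insertBy_nil]
  | y :: ys, hpw, hne => by
      obtain ⟨hy, hys⟩ := List.pairwise_cons.mp hpw
      rw [insertBy_cons]
      split_ifs with hxy
      · exact List.Pairwise.cons
          (by
            intro z hz
            rcases List.mem_cons.mp hz with rfl | hz
            · exact hxy
            · exact pairLt_trans hxy (hy z hz)) hpw
      · have hyx : pairLt y x = true := by
          rcases pairLt_total (a := x) (b := y) (fun h => hne y List.mem_cons_self h.symm) with h | h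
          · exact absurd h hxy
          · exact h
        refine List.Pairwise.cons ?_
          (pairwise_insertBy x ys hys (fun z hz => hne z (List.mem_cons_of_mem _ hz)))
        intro z hz
        rcases (PySem.List.mem_insertBy pairLt x z ys).mp hz with rfl | hz
        · exact hyx
        · exact hy z hz

-- (value, index) pairs of a totals list, indices starting at s — the contents of B's pool
def pairsFrom (s : Int) : List Int → List (Int × Int)
  | [] => []
  | x :: t => (x, s) :: pairsFrom (s + 1) t

theorem pairsFrom_length (s : Int) : ∀ l : List Int, (pairsFrom s l).length = l.length
  | [] => rfl
  | x :: t => by simp [pairsFrom, pairsFrom_length (s + 1) t]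

theorem mem_pairsFrom {y : Int × Int} :
    ∀ {l : List Int} {s : Int}, y ∈ pairsFrom s l ↔ ∃ (k : Nat) (h : k < l.length), y = (l[k], s + k)
  | [], s => by simp [pairsFrom]
  | x :: t, s => by
      simp only [pairsFrom, List.mem_cons, mem_pairsFrom (l := t) (s := s + 1)]
      constructor
      · rintro (rfl | ⟨k, hk, rfl⟩)
        · exact ⟨0, by simp, by simp⟩
        · exact ⟨k + 1, by simpa using hk, by simp [Prod.ext_iff]; omega⟩
      · rintro ⟨k, hk, rfl⟩
        cases k with
        | zero => left; simp
        | succ k => right; exact ⟨k, by simpa using hk, by simp [Prod.ext_iff]; omega⟩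

theorem getElem_pairsFrom :
    ∀ (l : List Int) (s : Int) (k : Nat) (h : k < l.length),
      (pairsFrom s l)[k]'(by rw [pairsFrom_length]; exact h) = (l[k], s + k)
  | x :: t, s, 0, h => by simp [pairsFrom]
  | x :: t, s, k + 1, h => by
      simp only [pairsFrom, List.getElem_cons_succ]
      rw [getElem_pairsFrom t (s + 1) k (by simpa using h)]
      simp [Prod.ext_iff]; omega

theorem pairsFrom_set :
    ∀ (l : List Int) (s : Int) (k : Nat) (v : Int), k < l.length →
      pairsFrom s (l.set k v) = (pairsFrom s l).set k (v, s + k)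
  | x :: t, s, 0, v, h => by simp [pairsFrom]
  | x :: t, s, k + 1, v, h => by
      simp only [List.set_cons_succ, pairsFrom, List.set_cons_succ]
      rw [pairsFrom_set t (s + 1) k v (by simpa using h)]
      have hh : s + 1 + (k : Int) = s + ((k + 1 : Nat) : Int) := by push_cast; ring
      rw [hh]

theorem pairsFrom_append (l1 : List Int) :
    ∀ (l2 : List Int) (s : Int),
      pairsFrom s (l1 ++ l2) = pairsFrom s l1 ++ pairsFrom (s + l1.length) l2 := by
  induction l1 with
  | nil => intro l2 s; simp [pairsFrom]
  | cons x t ih =>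
      intro l2 s
      simp only [List.cons_append, pairsFrom, ih, List.length_cons]
      have hh : s + 1 + (t.length : Int) = s + ((t.length + 1 : Nat) : Int) := by push_cast; ring
      rw [hh]

theorem scan_spec :
    ∀ (l : List Int) (m : Int) (k : Nat) (c : Int),
      l[k]? = some m → (∀ j : Nat, j < k → l[j]? ≠ some m) →
      splitA_scan l m c = c + k
  | [], m, k, c, hv, _ => by simp at hv
  | x :: t, m, 0, c, hv, _ => by
      simp only [List.getElem?_cons_zero, Option.some.injEq] at hv
      simp [splitA_scan, hv]
  | x :: t, m, k + 1, c, hv, hf => by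
      have hx : x ≠ m := by
        have := hf 0 (Nat.succ_pos k)
        simpa using this
      simp only [splitA_scan, if_neg hx]
      rw [scan_spec t m k (c + 1) (by simpa using hv)
        (fun j hj => by simpa using hf (j + 1) (by omega))]
      push_cast; ring

-- one unfolding of A's while-loop for a nonempty candies list
theorem loop2_step (cs res : List Int) (vis : List (List Int)) (hcs : cs ≠ [])
    {m : Int} (hm : PySem.List.min? res (fun x => x) = some m)
    {p : Int} {cs' : List Int} (hp : PySem.List.pop? cs = some (p, cs')) :
    splitA_loop2 cs res vis =
      splitA_loop2 cs'
        (PySem.List.pySetD res (splitA_scan res m 0)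
          (PySem.List.pyGetD res (splitA_scan res m 0) 0 + p))
        (PySem.List.pySetD vis (splitA_scan res m 0)
          (PySem.List.pyGetD vis (splitA_scan res m 0) [] ++ [p])) := by
  rw [splitA_loop2.eq_def, if_neg hcs, hm]
  split
  · rename_i heq
    cases heq
  · rename_i m2 heq
    injection heq with heq2
    subst heq2
    split
    · rename_i hnone
      rw [hp] at hnone
      cases hnone
    · rename_i p' cs'' hp'
      rw [hp] at hp'
      injection hp' with hpair
      injection hpair with h1 h2
      subst h1; subst h2
      rfl

theorem loop2_nil (res : List Int) (vis : List (List Int)) :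
    splitA_loop2 [] res vis = (res, vis) := by
  rw [splitA_loop2.eq_def]; simp

-- the heart of the equivalence: A's rescan loop and B's sorted-pool loop agree,
-- as long as the pool holds exactly the (total, child) pairs in lexicographic order
theorem loop2_eq :
    ∀ (rs res : List Int) (vis : List (List Int)) (pool : List (Int × Int)),
      res ≠ [] → pool.Perm (pairsFrom 0 res) →
      pool.Pairwise (fun a b => pairLt a b = true) →
      (splitA_loop2 rs.reverse res vis).2 = (rs.foldl splitB_step (vis, pool)).1 := by
  intro rs
  induction rs with
  | nil => intro res vis pool _ _ _; simp [loop2_nil]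
  | cons p rs ih =>
      intro res vis pool hres hperm hpw
      -- the pool is nonempty
      obtain ⟨⟨t, idx⟩, rest, rfl⟩ : ∃ a l, pool = a :: l := by
        cases hpool : pool with
        | nil =>
            exfalso
            cases res with
            | nil => exact hres rfl
            | cons r rtl =>
                rw [hpool] at hperm
                have hmem : ((r, (0 : Int)) : Int × Int) ∈ pairsFrom 0 (r :: rtl) := by
                  simp [pairsFrom]
                have := hperm.symm.subset hmem
                simp at this
        | cons a l => exact ⟨a, l, rfl⟩
      obtain ⟨hhead, hrestpw⟩ := List.pairwise_cons.mp hpw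
      -- the head of the pool is a genuine (value, index) pair of res
      obtain ⟨k, hk, hpair⟩ := mem_pairsFrom.mp (hperm.subset List.mem_cons_self)
      obtain ⟨ht, hidx⟩ : t = res[k] ∧ idx = (k : Int) := by
        have h1 := congrArg Prod.fst hpair
        have h2 := congrArg Prod.snd hpair
        simp at h1 h2; exact ⟨h1, h2⟩
      subst hidx
      -- every pair of res is the head or lex-greater than it
      have hmin : ∀ y ∈ pairsFrom (0 : Int) res, y = (t, (k : Int)) ∨ pairLt (t, (k : Int)) y = true := by
        intro y hy
        rcases List.mem_cons.mp (hperm.mem_iff.mpr hy) with rfl | hy'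
        · exact Or.inl rfl
        · exact Or.inr (hhead y hy')
      -- min(res) = t
      have hm : PySem.List.min? res (fun x => x) = some t := by
        cases hmo : PySem.List.min? res (fun x => x) with
        | none => exact absurd ((PySem.List.min?_eq_none_iff res _).mp hmo) hres
        | some m =>
            have hmem := PySem.List.min?_mem hmo
            have hle : m ≤ t := by
              have := PySem.List.min?_isMin hmo res[k] (List.getElem_mem hk)
              simpa [ht] using this
            obtain ⟨j, hj, hjm⟩ := List.mem_iff_getElem.mp hmem
            have hge : t ≤ m := by
              rcases hmin (res[j], (j : Int)) (mem_pairsFrom.mpr ⟨j, hj, by simp⟩) with heq | hlt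
              · have := congrArg Prod.fst heq; simp at this; omega
              · simp only [pairLt, decide_eq_true_eq] at hlt
                simp only [hjm] at hlt ⊢
                omega
            congr 1; omega
      -- A's first-index-of-the-minimum scan finds exactly the head's index
      have hscan : splitA_scan res t 0 = (k : Int) := by
        have h0 := scan_spec res t k 0 (by simp [ht, List.getElem?_eq_getElem hk])
          (by
            intro j hj hjm
            have hjlen : j < res.length := by omega
            rw [List.getElem?_eq_getElem hjlen] at hjm
            have hjv : res[j] = t := by simpa using hjm
            rcases hmin (res[j], (j : Int)) (mem_pairsFrom.mpr ⟨j, hjlen, by simp⟩) with heq | hlt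
            · have := congrArg Prod.snd heq; simp at this; omega
            · simp only [pairLt, decide_eq_true_eq, hjv] at hlt
              simp at hlt; omega)
        simpa using h0
      -- unfold one step of A
      rw [List.reverse_cons,
        loop2_step (rs.reverse ++ [p]) res vis (by simp) hm (PySem.List.pop?_last _ _), hscan]
      -- unfold one step of B
      have hstep : splitB_step (vis, (t, (k : Int)) :: rest) p =
          (PySem.List.pySetD vis (k : Int) (PySem.List.pyGetD vis (k : Int) [] ++ [p]),
           PySem.List.insertBy pairLt (t + p, (k : Int)) rest) := by
        simp [splitB_step, PySem.List.pop?_zero_cons]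
      rw [List.foldl_cons, hstep]
      -- rewrite A's updated totals as a plain set
      have hgetd : PySem.List.pyGetD res ((k : Int)) 0 = t := by
        simp [PySem.List.pyGetD_natCast, List.getD_eq_getElem?_getD, List.getElem?_eq_getElem hk, ht]
      rw [hgetd]
      have hsetd : PySem.List.pySetD res ((k : Int)) (t + p) = res.set k (t + p) := by
        simp [PySem.List.pySetD_natCast]
      rw [hsetd]
      -- apply the induction hypothesis to the updated state
      apply ih
      · intro h
        cases res with
        | nil => exact hres rfl
        | cons a l => cases k <;> simp at h
      · -- permutation of the updated pairs
        have hsplit : pairsFrom (0 : Int) res =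
            (pairsFrom (0 : Int) res).take k ++ (t, (k : Int)) :: (pairsFrom (0 : Int) res).drop (k + 1) := by
          conv_lhs => rw [← List.take_append_drop k (pairsFrom (0 : Int) res)]
          congr 1
          rw [List.drop_eq_getElem_cons (by rw [pairsFrom_length]; exact hk)]
          rw [getElem_pairsFrom res 0 k hk]
          simp [ht]
        have hrest : rest.Perm ((pairsFrom (0 : Int) res).take k ++ (pairsFrom (0 : Int) res).drop (k + 1)) := by
          have h1 : ((t, (k : Int)) :: rest).Perm
              ((t, (k : Int)) :: ((pairsFrom (0 : Int) res).take k ++ (pairsFrom (0 : Int) res).drop (k + 1))) :=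
            (hperm.trans (hsplit ▸ List.Perm.refl _)).trans List.perm_middle
          exact h1.cons_inv
        rw [pairsFrom_set res 0 k (t + p) hk]
        have hset : (pairsFrom (0 : Int) res).set k (t + p, (0 : Int) + (k : Int)) =
            (pairsFrom (0 : Int) res).take k ++ (t + p, (k : Int)) :: (pairsFrom (0 : Int) res).drop (k + 1) := by
          rw [List.set_eq_take_append_cons_drop]
          rw [if_pos (by rw [pairsFrom_length]; exact hk)]
          norm_num
        rw [hset]
        exact ((perm_insertBy pairLt (t + p, (k : Int)) rest).trans
          ((hrest.cons (t + p, (k : Int))).trans List.perm_middle.symm))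
      · -- sortedness of the updated pool
        apply pairwise_insertBy _ _ hrestpw
        intro y hy hyk
        have hylt := hhead y hy
        have hymem := hperm.subset (List.mem_cons_of_mem _ hy)
        obtain ⟨j, hj, rfl⟩ := mem_pairsFrom.mp hymem
        simp only at hyk
        have hjk : j = k := by omega
        subst hjk
        simp [pairLt, ht] at hylt

theorem getD_pad {α : Type} (pre : List α) (d e : α) (m k : Nat)
    (hpre : pre.length = k) (hm : 0 < m) :
    PySem.List.pyGetD (pre ++ List.replicate m d) ((k : Nat) : Int) e = d := by
  rw [PySem.List.pyGetD_natCast, List.getD_eq_getElem?_getD,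
      List.getElem?_append_right (by omega), hpre, Nat.sub_self, List.getElem?_replicate,
      if_pos hm]
  rfl

theorem set_pad {α : Type} (pre : List α) (d v : α) (m k : Nat)
    (hpre : pre.length = k) (hm : 0 < m) :
    PySem.List.pySetD (pre ++ List.replicate m d) ((k : Nat) : Int) v =
      (pre ++ [v]) ++ List.replicate (m - 1) d := by
  obtain ⟨m', rfl⟩ : ∃ m', m = m' + 1 := ⟨m - 1, by omega⟩
  rw [PySem.List.pySetD_natCast, List.set_append_right _ _ (by omega), hpre, Nat.sub_self,
      List.replicate_succ, List.set_cons_zero]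
  simp

theorem take_expand {α : Type} (l : List α) (k : Nat) (h : k < l.length) :
    l.take (k + 1) = l.take k ++ [l[k]] := by
  rw [List.take_add_one, List.getElem?_eq_getElem h]
  rfl

theorem phaseA (S : List Int) (K : Nat) (hK : K ≤ S.length) :
    ∀ k : Nat, k ≤ K →
      (PySem.List.pyRange 0 (k : Int) 1).foldl splitA_step1
          (S, List.replicate K (0 : Int), List.replicate K ([] : List Int))
        = (S.take (S.length - k),
           S.reverse.take k ++ List.replicate (K - k) (0 : Int),
           (S.reverse.take k).map (fun c => [c]) ++ List.replicate (K - k) ([] : List Int)) := by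
  intro k
  induction k with
  | zero =>
      intro _
      simp only [Nat.cast_zero, PySem.List.pyRange_one_eq_nil (le_refl (0 : Int))]
      simp
  | succ k ih =>
      intro hk1
      have hkK : k < K := hk1
      have hkn : k < S.length := lt_of_lt_of_le hkK hK
      have hkr : k < S.reverse.length := by simpa using hkn
      have hcast : ((k + 1 : Nat) : Int) = (k : Int) + 1 := by push_cast; ring
      rw [hcast, PySem.List.pyRange_one_succ_right (by omega), List.foldl_append,
        ih (by omega)]
      simp only [List.foldl_cons, List.foldl_nil]
      have hget : S[S.length - k - 1]? = some (S.reverse[k]'hkr) := by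
        have h2 : S.length - k - 1 = S.length - 1 - k := by omega
        rw [h2, List.getElem?_eq_getElem (by omega)]
        exact congrArg some (List.getElem_reverse hkr).symm
      have htake : S.take (S.length - k) =
          S.take (S.length - k - 1) ++ [S.reverse[k]'hkr] := by
        have hlen : S.length - k = (S.length - k - 1) + 1 := by omega
        conv_lhs => rw [hlen]
        rw [List.take_add_one, hget]
        rfl
      have hpop : PySem.List.pop? (S.take (S.length - k)) =
          some (S.reverse[k]'hkr, S.take (S.length - k - 1)) := by
        rw [htake]; exact PySem.List.pop?_last _ _
      have hlentk : (S.reverse.take k).length = k := by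
        simp; omega
      have hlenmk : ((S.reverse.take k).map (fun c => ([c] : List Int))).length = k := by
        simp; omega
      simp only [splitA_step1, hpop]
      refine congrArg₂ Prod.mk ?_ (congrArg₂ Prod.mk ?_ ?_)
      · have : S.length - (k + 1) = S.length - k - 1 := by omega
        rw [this]
      · rw [getD_pad _ _ _ _ _ hlentk (by omega), zero_add,
          set_pad _ _ _ _ _ hlentk (by omega), take_expand S.reverse k hkr]
        simp [Nat.sub_sub]
      · rw [getD_pad _ _ _ _ _ hlenmk (by omega), List.nil_append,
          set_pad _ _ _ _ _ hlenmk (by omega), take_expand S.reverse k hkr, List.map_append]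
        simp [Nat.sub_sub]

theorem phaseB (desc : List Int) (K : Nat) (hK : K ≤ desc.length) :
    ∀ k : Nat, k ≤ K → ∃ pool : List (Int × Int),
      (PySem.List.pyRange 0 (k : Int) 1).foldl (splitB_init desc) ([], [])
        = ((desc.take k).map (fun c => ([c] : List Int)), pool)
      ∧ pool.Perm (pairsFrom 0 (desc.take k))
      ∧ pool.Pairwise (fun a b => pairLt a b = true) := by
  intro k
  induction k with
  | zero =>
      intro _
      refine ⟨[], ?_, ?_, ?_⟩
      · simp only [Nat.cast_zero, PySem.List.pyRange_one_eq_nil (le_refl (0 : Int))]; simp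
      · simp [pairsFrom]
      · simp
  | succ k ih =>
      intro hk1
      obtain ⟨pool, heq, hperm, hpw⟩ := ih (by omega)
      have hkd : k < desc.length := by omega
      have hlen : (desc.take k).length = k := by simp; omega
      have hcast : ((k + 1 : Nat) : Int) = (k : Int) + 1 := by push_cast; ring
      rw [hcast, PySem.List.pyRange_one_succ_right (by omega), List.foldl_append, heq]
      simp only [List.foldl_cons, List.foldl_nil, splitB_init]
      have hget : PySem.List.pyGetD desc ((k : Nat) : Int) 0 = desc[k] := by
        rw [PySem.List.pyGetD_natCast, List.getD_eq_getElem?_getD, List.getElem?_eq_getElem hkd]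
        rfl
      rw [hget]
      refine ⟨PySem.List.insertBy pairLt (desc[k], (k : Int)) pool, ?_, ?_, ?_⟩
      · rw [take_expand desc k hkd, List.map_append]
        rfl
      · rw [take_expand desc k hkd, pairsFrom_append, hlen]
        have hsing : pairsFrom ((0 : Int) + (k : Nat)) [desc[k]] = [(desc[k], (k : Int))] := by
          simp [pairsFrom]
        rw [hsing]
        exact ((perm_insertBy pairLt (desc[k], (k : Int)) pool).trans
          ((hperm.cons (desc[k], (k : Int))).trans
            (List.perm_append_singleton (desc[k], (k : Int)) (pairsFrom 0 (desc.take k))).symm))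
      · apply pairwise_insertBy _ _ hpw
        intro y hy
        obtain ⟨j, hj, rfl⟩ := mem_pairsFrom.mp (hperm.subset hy)
        have hjk : j < k := by omega
        simp
        omega

theorem split_candy_spec : Claim_equal_split_candy := by
  unfold Claim_equal_split_candy
  intro children candies _ hpre
  unfold Spec_split_candy
  obtain ⟨hlen, hz⟩ := hpre
  by_cases hc : children ≤ 0
  · have hnil : candies = [] := hz hc
    subst hnil
    have hs : PySem.List.sorted ([] : List Int) (fun x => x) = [] := by
      rw [PySem.List.sorted_eq_nil_iff]
    simp [split_candy, split_candy_alt, hs, pyRev_eq_reverse,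
      PySem.List.pyRange_one_eq_nil hc, Int.toNat_of_nonpos hc, loop2_nil,
      PySem.List.slice_some_none]
  · have hcpos : (0 : Int) < children := by omega
    have hKc : ((children.toNat : Nat) : Int) = children := Int.toNat_of_nonneg (by omega)
    have hSlen : (PySem.List.sorted candies (fun x => x)).length = candies.length :=
      PySem.List.length_sorted _ _ _
    have hKn : children.toNat ≤ (PySem.List.sorted candies (fun x => x)).length := by
      rw [hSlen]; omega
    have hK0 : 0 < children.toNat := by omega
    simp only [split_candy, split_candy_alt, pyRev_eq_reverse]
    rw [← hKc]
    have hvis0 : (PySem.List.pyRange 0 ((children.toNat : Nat) : Int) 1).map (fun _ => ([] : List Int))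
        = List.replicate children.toNat ([] : List Int) := by
      rw [List.map_const']
      congr 1
      rw [PySem.List.length_pyRange_one]
      omega
    rw [hvis0]
    simp only [Int.toNat_natCast]
    rw [phaseA (PySem.List.sorted candies (fun x => x)) children.toNat hKn children.toNat le_rfl]
    simp only [Nat.sub_self, List.replicate_zero, List.append_nil]
    obtain ⟨pool, heqB, hperm, hpw⟩ :=
      phaseB (PySem.List.sorted candies (fun x => x)).reverse children.toNat
        (by simpa using hKn) children.toNat le_rfl
    rw [PySem.List.slice_from_natCast, heqB]
    have hrs : ((PySem.List.sorted candies (fun x => x)).reverse.drop children.toNat).reverse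
        = (PySem.List.sorted candies (fun x => x)).take
            ((PySem.List.sorted candies (fun x => x)).length - children.toNat) := by
      rw [List.reverse_drop]
      simp
    rw [← hrs]
    refine congrArg (List.map (fun v => List.reverse v)) ?_
    refine loop2_eq ((PySem.List.sorted candies (fun x => x)).reverse.drop children.toNat)
      ((PySem.List.sorted candies (fun x => x)).reverse.take children.toNat) _ pool ?_ hperm hpw
    intro h
    have hlen2 := congrArg List.length h
    simp only [List.length_take, List.length_reverse, List.length_nil] at hlen2
    omega
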